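-- pv_equiv track=rewrite | github.com/guillermoig/AoC2021-Python | day06/Lanternfish.py | run_a_day
-- ===== SOURCE A (Python) =====
-- def run_a_day(lanternfish_list: list) -> list:
--     next_lanternfish_list = [0 for i in range(9)]
--     next_lanternfish_list[6] = lanternfish_list[0]
--     next_lanternfish_list[8] = lanternfish_list[0]
--     for index in range(0, len(lanternfish_list)-1):
--         next_lanternfish_list[index] += lanternfish_list[index + 1]
--     lanternfish_list = next_lanternfish_list
--     return lanternfish_list
-- ===== SOURCE B (Python) =====
-- def run_a_day(lanternfish_list: list) -> list:
--     # Lanternfish transition-matrix formulation: each output timer slot j is the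
--     # sum of the input counts x[i] whose fish move to timer j in one day
--     # (timer i>0 goes to i-1; timer 0 respawns at 6 and spawns a new fish at 8).
--     n = len(lanternfish_list)
--     return [
--         sum(lanternfish_list[i] for i in range(n)
--             if i == j + 1 or (i == 0 and j in (6, 8)))
--         for j in range(9)
--     ]
-- ===== Notes on version B (the rewrite author's own statement) =====
-- stated objective: alternative
-- what changed: Replaces A's mutated 9-slot seed array with two index writes and a shifting loop by a transition-matrix formulation: each of the 9 output slots is computed independently as a selective sum of input counts that feed it.
import Mathlib
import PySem

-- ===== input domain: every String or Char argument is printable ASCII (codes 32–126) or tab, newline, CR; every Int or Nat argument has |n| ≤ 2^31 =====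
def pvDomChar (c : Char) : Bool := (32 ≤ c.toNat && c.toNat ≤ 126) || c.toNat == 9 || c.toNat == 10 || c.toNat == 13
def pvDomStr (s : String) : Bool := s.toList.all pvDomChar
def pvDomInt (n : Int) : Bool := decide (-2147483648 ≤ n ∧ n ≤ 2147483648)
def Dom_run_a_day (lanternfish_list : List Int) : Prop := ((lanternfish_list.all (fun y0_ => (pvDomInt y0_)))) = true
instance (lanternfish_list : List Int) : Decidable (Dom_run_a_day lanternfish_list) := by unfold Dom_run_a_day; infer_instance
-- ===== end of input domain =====

-- B replaces A's seed-array-with-index-writes-and-shift-loop by a transition-matrix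
-- formulation: each output slot is an independent selective sum (objective: alternative).

-- ===== PORT A =====
def run_a_day (lanternfish_list : List Int) : List Int :=
  -- next_lanternfish_list = [0 for i in range(9)]
  let next := (PySem.List.pyRange 0 9 1).map (fun _ => (0 : Int))
  -- lanternfish_list[0]; Pre_ guarantees the index is in range, so .getD 0 is never taken on admitted inputs
  let v0 := (PySem.List.pyGet? lanternfish_list 0).getD 0
  let next := next.set 6 v0
  let next := next.set 8 v0
  -- for index in range(0, len(lanternfish_list)-1): next[index] += lanternfish_list[index+1]
  let next := (PySem.List.pyRange 0 ((lanternfish_list.length : Int) - 1) 1).foldl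
    (fun acc index =>
      acc.set index.toNat
        ((PySem.List.pyGet? acc index).getD 0 + (PySem.List.pyGet? lanternfish_list (index + 1)).getD 0))
    next
  next

-- ===== PORT B =====
def run_a_day_alt (lanternfish_list : List Int) : List Int :=
  -- n = len(lanternfish_list)
  let n := lanternfish_list.length
  -- [sum(x[i] for i in range(n) if i == j+1 or (i == 0 and j in (6,8))) for j in range(9)]
  (List.range 9).map (fun j =>
    (List.range n).foldl
      (fun (s : Int) (i : Nat) =>
        if i = j + 1 ∨ (i = 0 ∧ (j = 6 ∨ j = 8)) then
          s + (PySem.List.pyGet? lanternfish_list (i : Int)).getD 0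
        else s)
      (0 : Int))

-- ===== PRECONDITION & SPEC =====
-- A raises IndexError on the empty list (reads index 0) and on lists longer than 10 (its loop writes index 9 of a 9-slot list).
def Pre_run_a_day (lanternfish_list : List Int) : Prop :=
  1 ≤ lanternfish_list.length ∧ lanternfish_list.length ≤ 10
instance (lanternfish_list : List Int) : Decidable (Pre_run_a_day lanternfish_list) := by unfold Pre_run_a_day; infer_instance
def pvWitness_run_a_day : List Int := [3, 1, 4, 1, 5, 9, 2, 6, 5]

def Spec_run_a_day (lanternfish_list : List Int) (out : List Int) : Prop := out = run_a_day_alt lanternfish_list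
instance (lanternfish_list : List Int) (out : List Int) : Decidable (Spec_run_a_day lanternfish_list out) := by unfold Spec_run_a_day; infer_instance

-- ===== CLAIM =====
def Claim_equal_run_a_day : Prop := ∀ (lanternfish_list : List Int), Dom_run_a_day lanternfish_list → Pre_run_a_day lanternfish_list → Spec_run_a_day lanternfish_list (run_a_day lanternfish_list)

-- ===== LEMMAS AND PROOFS =====

-- ===== VERDICT =====
theorem run_a_day_spec : Claim_equal_run_a_day := by
  intro x _ hpre
  unfold Spec_run_a_day
  obtain ⟨h1, h2⟩ := hpre
  rcases x with _ | ⟨a0, _ | ⟨a1, _ | ⟨a2, _ | ⟨a3, _ | ⟨a4, _ | ⟨a5, _ | ⟨a6, _ | ⟨a7, _ | ⟨a8, _ | ⟨a9, _ | ⟨a10, rest⟩⟩⟩⟩⟩⟩⟩⟩⟩⟩⟩ <;>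
    first
      | (exfalso; simp at h1 h2; omega)
      | (simp [run_a_day, run_a_day_alt, PySem.List.pyRange_one, PySem.List.pyGet?, PySem.List.pyIdx?,
          List.range_succ]
         try omega)
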